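-- pv_equiv track=rewrite | github.com/bigluck07/All_night_study | 알고리즘/programmers/코테입문/공던지기.py | solution
-- ===== SOURCE A (Python) =====
-- def solution(numbers, k):
--     answer = 0
--     point = 0
--     cnt = 0
--     while cnt != k:
--         if point >= len(numbers)-1:
--             point -= len(numbers)
--
--         answer = numbers[point]
--         cnt+=1
--         point+=2
--     return answer
-- ===== SOURCE B (Python) =====
-- def solution(numbers, k):
--     return numbers[(2 * (k - 1)) % len(numbers)]
-- ===== Notes on version B (the rewrite author's own statement) =====
-- stated objective: faster
-- what changed: Replaces A's k-step simulation of the wrapping pointer by the closed-form index (2*(k-1)) % len(numbers), read once.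
-- outside the precondition, e.g. on solution([1, 2, 3], 0): A returns 0, B returns 2
import Mathlib
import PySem

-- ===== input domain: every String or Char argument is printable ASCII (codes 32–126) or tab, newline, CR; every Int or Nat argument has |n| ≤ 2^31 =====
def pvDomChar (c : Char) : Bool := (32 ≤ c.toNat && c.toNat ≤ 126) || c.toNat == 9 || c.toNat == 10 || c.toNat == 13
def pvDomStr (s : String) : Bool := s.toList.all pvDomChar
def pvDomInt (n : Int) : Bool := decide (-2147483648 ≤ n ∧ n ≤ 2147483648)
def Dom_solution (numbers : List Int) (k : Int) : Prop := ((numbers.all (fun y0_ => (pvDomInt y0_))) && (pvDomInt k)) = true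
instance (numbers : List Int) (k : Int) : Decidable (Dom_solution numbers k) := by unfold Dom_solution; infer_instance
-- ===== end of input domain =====

-- B replaces A's O(k) pointer simulation by the O(1) closed-form index (2*(k-1)) % len(numbers).

-- ===== PORT A =====
-- the while loop, one iteration per remaining count (fuel = k.toNat; Pre_ guarantees k ≥ 1)
def solutionGo (numbers : List Int) : Nat → Int → Int → Int
  | 0, answer, _ => answer
  | fuel + 1, _, point =>
      let point' := if point ≥ (numbers.length : Int) - 1 then point - (numbers.length : Int) else point
      let answer' := PySem.List.pyGetD numbers point' 0   -- numbers[point]; in range under Pre_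
      solutionGo numbers fuel answer' (point' + 2)

def solution (numbers : List Int) (k : Int) : Int :=
  solutionGo numbers k.toNat 0 0

-- ===== PORT B =====
def solution_alt (numbers : List Int) (k : Int) : Int :=
  PySem.List.pyGetD numbers (PySem.Int.mod (2 * (k - 1)) (numbers.length : Int)) 0

-- ===== PRECONDITION & SPEC =====
-- Pre_ excludes: empty numbers (A raises IndexError, B raises ZeroDivisionError); k < 0 (A loops forever);
-- k = 0, where A never runs the loop and returns the initial answer 0 without looking at numbers — a corner
-- outside the problem's k ≥ 1 domain where neither value is specified; and single-element lists with k ≥ 3,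
-- where A's drifting pointer reaches index 1 and raises IndexError.
def Pre_solution (numbers : List Int) (k : Int) : Prop :=
  numbers ≠ [] ∧ 1 ≤ k ∧ (numbers.length = 1 → k ≤ 2)
instance (numbers : List Int) (k : Int) : Decidable (Pre_solution numbers k) := by
  unfold Pre_solution; infer_instance

def pvWitness_solution : List Int × Int := ([1, 2, 3, 4, 5], 7)

def Spec_solution (numbers : List Int) (k : Int) (out : Int) : Prop := out = solution_alt numbers k
instance (numbers : List Int) (k : Int) (out : Int) : Decidable (Spec_solution numbers k out) := by
  unfold Spec_solution; infer_instance

-- ===== CLAIM (what is proved, stated in full; the proofs are below) =====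
def Claim_equal_solution : Prop := ∀ (numbers : List Int) (k : Int),
  Dom_solution numbers k → Pre_solution numbers k → Spec_solution numbers k (solution numbers k)

-- ===== LEMMAS AND PROOFS =====

-- indexing is invariant under adding the length (for indices in [-n, n))
lemma pyGetD_emod (numbers : List Int) (q : Int)
    (h1 : -(numbers.length : Int) ≤ q) (h2 : q < (numbers.length : Int)) (hn : 0 < (numbers.length : Int)) :
    PySem.List.pyGetD numbers q 0 =
      PySem.List.pyGetD numbers (q % (numbers.length : Int)) 0 := by
  by_cases hq : 0 ≤ q
  · rw [Int.emod_eq_of_lt hq h2]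
  · have hk : q = -(((-q).toNat : Nat) : Int) := by omega
    have hmod : q % (numbers.length : Int) = q + (numbers.length : Int) := by
      calc q % (numbers.length : Int) = (q + numbers.length) % (numbers.length : Int) :=
            (Int.add_emod_right q _).symm
        _ = q + numbers.length := by apply Int.emod_eq_of_lt <;> omega
    have hpos : 0 < (-q).toNat := by omega
    have hle : (-q).toNat ≤ numbers.length := by omega
    have hcast : q + (numbers.length : Int) = ((numbers.length - (-q).toNat : Nat) : Int) := by omega
    rw [hmod, hcast, PySem.List.pyGetD_natCast, hk,
        PySem.List.pyGetD_neg_natCast numbers (-q).toNat 0 hpos hle]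
    have hlt : numbers.length - (-q).toNat < numbers.length := by omega
    have hmax : (-q) ⊔ 0 = -q := by omega
    simp [List.getD, hmax, hlt]

-- one unfolding of the loop
lemma go_succ (numbers : List Int) (fuel : Nat) (a p : Int) :
    solutionGo numbers (fuel + 1) a p =
      solutionGo numbers fuel
        (PySem.List.pyGetD numbers (if p ≥ (numbers.length : Int) - 1 then p - (numbers.length : Int) else p) 0)
        ((if p ≥ (numbers.length : Int) - 1 then p - (numbers.length : Int) else p) + 2) := rfl

-- loop invariant for lists of length ≥ 2: with point p ∈ [0, n], p ≡ 2c (mod n),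
-- running t+1 more iterations yields numbers[(2(c+t)) % n]
lemma go_eq (numbers : List Int) (hn : 2 ≤ (numbers.length : Int)) :
    ∀ (t : Nat) (c p a : Int), 0 ≤ p → p ≤ (numbers.length : Int) →
      p % (numbers.length : Int) = (2 * c) % (numbers.length : Int) →
      solutionGo numbers (t + 1) a p =
        PySem.List.pyGetD numbers ((2 * (c + t)) % (numbers.length : Int)) 0 := by
  intro t
  induction t with
  | zero =>
    intro c p a hp0 hpn hpc
    rw [go_succ]
    set n : Int := (numbers.length : Int) with hn'
    show PySem.List.pyGetD numbers (if p ≥ n - 1 then p - n else p) 0 = _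
    by_cases hbr : p ≥ n - 1
    · rw [if_pos hbr, pyGetD_emod numbers (p - n) (by omega) (by omega) (by omega)]
      have h2 : (p - n) % n = (2 * (c + (0 : Nat))) % n := by
        rw [Int.sub_emod, Int.emod_self]
        push_cast
        simpa using hpc
      rw [h2]
    · rw [if_neg hbr, pyGetD_emod numbers p (by omega) (by omega) (by omega)]
      have h2 : p % n = (2 * (c + (0 : Nat))) % n := by push_cast; simpa using hpc
      rw [h2]
  | succ t ih =>
    intro c p a hp0 hpn hpc
    rw [go_succ]
    set n : Int := (numbers.length : Int) with hn'
    by_cases hbr : p ≥ n - 1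
    · rw [if_pos hbr]
      rw [ih (c + 1) (p - n + 2) _ (by omega) (by omega)
        (by rw [show p - n + 2 = (p + 2) - n by ring, Int.sub_emod, Int.emod_self,
                show 2 * (c + 1) = 2 * c + 2 by ring]
            simp [Int.add_emod, hpc])]
      rw [show c + 1 + (t : Int) = c + ((t : Nat) + 1 : Nat) by push_cast; ring]
    · rw [if_neg hbr]
      rw [ih (c + 1) (p + 2) _ (by omega) (by omega)
        (by rw [show 2 * (c + 1) = 2 * c + 2 by ring]
            simp [Int.add_emod, hpc])]
      rw [show c + 1 + (t : Int) = c + ((t : Nat) + 1 : Nat) by push_cast; ring]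

lemma singleton_case (x : Int) (k : Int) (hk1 : 1 ≤ k) (hk2 : k ≤ 2) :
    solution [x] k = solution_alt [x] k := by
  have hmod : PySem.Int.mod (2 * (k - 1)) ((([x] : List Int).length : Int)) = 0 := by
    simp [PySem.Int.mod_eq_emod_of_pos]
  interval_cases k
  · simp [solution, solutionGo, solution_alt, PySem.List.pyGetD_neg_ofNat [x] 1 0 (by omega) (by simp)]
  · simp [solution, solutionGo, solution_alt]

-- ===== VERDICT (by name: the statement is the Claim_ definition above) =====
theorem solution_spec : Claim_equal_solution := by
  intro numbers k _ hpre
  obtain ⟨hne, hk, h1⟩ := hpre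
  unfold Spec_solution
  rcases Nat.lt_or_ge numbers.length 2 with hlen | hlen
  · have hlen1 : numbers.length = 1 := by
      cases numbers with
      | nil => exact absurd rfl hne
      | cons x xs => simp at hlen ⊢; omega
    obtain ⟨x, hx⟩ : ∃ x, numbers = [x] := by
      cases numbers with
      | nil => exact absurd rfl hne
      | cons x xs => exact ⟨x, by simpa using congrArg (List.cons x) (by simpa using hlen1)⟩
    subst hx
    exact singleton_case x k hk (h1 (by simp))
  · have hn2 : 2 ≤ (numbers.length : Int) := by exact_mod_cast hlen
    have hkt : k.toNat = (k.toNat - 1) + 1 := by omega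
    unfold solution
    rw [hkt, go_eq numbers hn2 (k.toNat - 1) 0 0 0 le_rfl (by omega) (by simp)]
    unfold solution_alt
    rw [PySem.Int.mod_eq_emod_of_pos (by omega)]
    congr 1
    have : ((k.toNat - 1 : Nat) : Int) = k - 1 := by omega
    rw [this]
    ring_nf
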